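-- pv_equiv track=rewrite | github.com/WJD1005/2048Robot | AI版/greedy.py | try_move_left
-- ===== SOURCE A (Python) =====
-- import copy
--
-- def try_move_left(map):
--     """
--     尝试向左移动，计算总分数。
--     :param map: 地图
--     :return: 是否有效, 移动获得的分数
--     """
--     is_valid = False
--     score = 0
--     map_temp = copy.deepcopy(map)  # 副本
--     # 提取一行
--     for i in range(4):
--         # 遍历前方块
--         for j in range(3):
--             # 寻找下一个非0
--             for next in range(j + 1, 4):
--                 if map_temp[i][next] != 0:
--                     # 如果前方块是0则移动，并继续往后看
--                     if map_temp[i][j] == 0: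
--                         map_temp[i][j] = map_temp[i][next]
--                         map_temp[i][next] = 0
--                         is_valid = True
--                     # 如果和前方块相等则合并并跳出不再找下一个避免重复合并
--                     elif map_temp[i][j] == map_temp[i][next]:
--                         map_temp[i][j] *= 2
--                         map_temp[i][next] = 0
--                         score += map_temp[i][j]
--                         is_valid = True
--                         break
--                     # 如果和前方块不相等则直接跳出
--                     else:
--                         break
--             # 后面没有非0了这行可以结束了
--             else:
--                 break
--     score += adjacent_check(map_temp)  # 计算相邻方块对分数
--     return is_valid, score
--
-- def adjacent_check(map):
--     """
--     检查相邻方块配对，一对相邻方块加方块数字的分数（合成的一半）。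
--     :param map: 地图
--     :return: 相邻方块对分数
--     """
--     score = 0
--     # 检查行有无2个相邻相同方块
--     for i in range(4):
--         j = 0
--         while j < 3:
--             if map[i][j] == map[i][j + 1]:
--                 score += map[i][j]
--                 j += 2  # 两两配对都跳过
--             else:
--                 j += 1
--     # 检查列有无2个相邻相同方块
--     for j in range(4):
--         i = 0
--         while i < 3:
--             if map[i][j] == map[i + 1][j]:
--                 score += map[i][j]
--                 i += 2  # 两两配对都跳过
--             else:
--                 i += 1
--     return score
-- ===== SOURCE B (Python) =====
-- def _pairs(a, b, c, d):
--     # greedy adjacent-pair score of a line of 4: identical to the while-j skip-by-2 scan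
--     if a == b:
--         return a + (c if c == d else 0)
--     if b == c:
--         return b
--     if c == d:
--         return c
--     return 0
--
-- def adjacent_check(map):
--     score = 0
--     for i in range(4):
--         score += _pairs(map[i][0], map[i][1], map[i][2], map[i][3])
--     for j in range(4):
--         score += _pairs(map[0][j], map[1][j], map[2][j], map[3][j])
--     return score
--
-- def _merge(tiles):
--     # merge adjacent equal tiles left-to-right; returns (merged list, score gained)
--     merged = []
--     score = 0
--     k = 0
--     while k < len(tiles):
--         if k + 1 < len(tiles) and tiles[k] == tiles[k + 1]:
--             merged.append(tiles[k] * 2)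
--             score += tiles[k] * 2
--             k += 2
--         else:
--             merged.append(tiles[k])
--             k += 1
--     return merged, score
--
-- def try_move_left(map):
--     map_temp = [row[:] for row in map]
--     is_valid = False
--     score = 0
--     for i in range(4):
--         row = map_temp[i]
--         old4 = row[:4]
--         merged, s = _merge([x for x in old4 if x != 0])
--         score += s
--         new4 = merged + [0] * (4 - len(merged))
--         if new4 != old4:
--             is_valid = True
--         map_temp[i] = new4 + row[4:]
--     score += adjacent_check(map_temp)
--     return is_valid, score
-- ===== Notes on version B (the rewrite author's own statement) =====
-- stated objective: simpler
-- what changed: Replaces A's in-place triple-nested index-shuffling move loop by a per-row compress-then-merge pass over the non-zero tiles (row changed => valid), and replaces adjacent_check's while-loops with skip-by-2 index jumps by a closed-form greedy pair formula applied to each row and column.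
import Mathlib
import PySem

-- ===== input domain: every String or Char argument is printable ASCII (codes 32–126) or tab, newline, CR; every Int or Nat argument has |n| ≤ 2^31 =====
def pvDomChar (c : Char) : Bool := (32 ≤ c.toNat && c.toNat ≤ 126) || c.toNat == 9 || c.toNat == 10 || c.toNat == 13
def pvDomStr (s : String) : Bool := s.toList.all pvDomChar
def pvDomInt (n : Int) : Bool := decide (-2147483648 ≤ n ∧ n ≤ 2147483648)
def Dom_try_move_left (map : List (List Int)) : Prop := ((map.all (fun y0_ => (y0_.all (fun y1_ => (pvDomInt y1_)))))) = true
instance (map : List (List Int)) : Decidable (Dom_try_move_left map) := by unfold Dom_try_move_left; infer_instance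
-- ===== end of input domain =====

-- B replaces A's in-place triple-nested index-shuffling loop by a per-row compress-merge pass
-- and replaces adjacent_check's while-loops by a closed-form greedy pair formula (objective: simpler).
-- Neither implementation mutates its argument (A deepcopies, B copies).

-- ===== PORT A =====
-- All indices used by A are the literals 0..3 and are in range under Pre_, so Python's
-- map_temp[i][j] reads/writes are ported with List.getD/List.set (exact there).
def pvGet (b : List (List Int)) (i j : Nat) : Int := (b.getD i []).getD j 0

-- `for next in range(j+1, 4)` with its for-else; returns (row, is_valid, score, break-outer?)
def aNext (r : List Int) (j next : Nat) (valid : Bool) (score : Int) :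
    List Int × Bool × Int × Bool :=
  if next < 4 then
    if r.getD next 0 ≠ 0 then
      if r.getD j 0 = 0 then
        aNext ((r.set j (r.getD next 0)).set next 0) j (next+1) true score
      else if r.getD j 0 = r.getD next 0 then
        let r2 := (r.set j (r.getD j 0 * 2)).set next 0
        (r2, true, score + r2.getD j 0, false)
      else (r, valid, score, false)
    else aNext r j (next+1) valid score
  else (r, valid, score, true)
termination_by 4 - next

-- `for j in range(3)` (broken out of when the inner for-else fires)
def aJ (r : List Int) (j : Nat) (valid : Bool) (score : Int) : List Int × Bool × Int :=
  if j < 3 then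
    let p := aNext r j (j+1) valid score
    if p.2.2.2 then (p.1, p.2.1, p.2.2.1) else aJ p.1 (j+1) p.2.1 p.2.2.1
  else (r, valid, score)
termination_by 3 - j

-- `for i in range(4)` (the body only touches row i)
def aI (b : List (List Int)) (i : Nat) (valid : Bool) (score : Int) :
    List (List Int) × Bool × Int :=
  if i < 4 then
    let p := aJ (b.getD i []) 0 valid score
    aI (b.set i p.1) (i+1) p.2.1 p.2.2
  else (b, valid, score)
termination_by 4 - i

-- adjacent_check's `while j < 3` over row i
def adjRow (b : List (List Int)) (i j : Nat) (score : Int) : Int :=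
  if j < 3 then
    if pvGet b i j = pvGet b i (j+1) then adjRow b i (j+2) (score + pvGet b i j)
    else adjRow b i (j+1) score
  else score
termination_by 3 - j

-- adjacent_check's `while i < 3` over column j
def adjCol (b : List (List Int)) (j i : Nat) (score : Int) : Int :=
  if i < 3 then
    if pvGet b i j = pvGet b (i+1) j then adjCol b j (i+2) (score + pvGet b i j)
    else adjCol b j (i+1) score
  else score
termination_by 3 - i

def adjacent_check (b : List (List Int)) : Int :=
  [0,1,2,3].foldl (fun s j => adjCol b j 0 s)
    ([0,1,2,3].foldl (fun s i => adjRow b i 0 s) 0)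

def try_move_left (map : List (List Int)) : Bool × Int :=
  let p := aI map 0 false 0
  (p.2.1, p.2.2 + adjacent_check p.1)

-- ===== PORT B =====
-- greedy adjacent-pair score of a line of 4 (closed form of the skip-by-2 scan)
def pairs (a b c d : Int) : Int :=
  if a = b then a + (if c = d then c else 0)
  else if b = c then b
  else if c = d then c
  else 0

def adjacent_check_alt (b : List (List Int)) : Int :=
  ([0,1,2,3].map (fun i => pairs (pvGet b i 0) (pvGet b i 1) (pvGet b i 2) (pvGet b i 3))).sum
  + ([0,1,2,3].map (fun j => pairs (pvGet b 0 j) (pvGet b 1 j) (pvGet b 2 j) (pvGet b 3 j))).sum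

-- merge adjacent equal tiles left-to-right; returns (merged list, score gained)
def mergeTiles : List Int → List Int × Int
  | [] => ([], 0)
  | [x] => ([x], 0)
  | x :: y :: rest =>
    if x = y then
      let p := mergeTiles rest
      (x * 2 :: p.1, p.2 + x * 2)
    else
      let p := mergeTiles (y :: rest)
      (x :: p.1, p.2)

-- one row of B's loop body: (new row, row changed?, merge score)
def bRow (r : List Int) : List Int × Bool × Int :=
  let old4 := r.take 4
  let p := mergeTiles (old4.filter (fun x => x ≠ 0))
  let new4 := p.1 ++ List.replicate (4 - p.1.length) 0
  (new4 ++ r.drop 4, decide (new4 ≠ old4), p.2)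

def try_move_left_alt (map : List (List Int)) : Bool × Int :=
  let st := [0,1,2,3].foldl
    (fun (st : List (List Int) × Bool × Int) i =>
      let p := bRow (st.1.getD i [])
      (st.1.set i p.1, st.2.1 || p.2.1, st.2.2 + p.2.2))
    (map, false, 0)
  (st.2.1, st.2.2 + adjacent_check_alt st.1)

-- ===== PRECONDITION & SPEC =====
-- A indexes rows 0..3 and columns 0..3; on anything smaller Python raises IndexError.
def Pre_try_move_left (map : List (List Int)) : Prop :=
  4 ≤ map.length ∧ ∀ r ∈ map.take 4, 4 ≤ r.length
instance (map : List (List Int)) : Decidable (Pre_try_move_left map) := by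
  unfold Pre_try_move_left; infer_instance

def pvWitness_try_move_left : List (List Int) :=
  [[2,0,2,0],[0,0,0,0],[4,4,0,0],[2,4,8,16]]

def Spec_try_move_left (map : List (List Int)) (out : Bool × Int) : Prop := out = try_move_left_alt map
instance (map : List (List Int)) (out : Bool × Int) : Decidable (Spec_try_move_left map out) := by unfold Spec_try_move_left; infer_instance

-- ===== CLAIM (what is proved, stated in full; the proofs are below) =====
def Claim_equal_try_move_left : Prop := ∀ (map : List (List Int)), Dom_try_move_left map → Pre_try_move_left map → Spec_try_move_left map (try_move_left map)

-- ===== LEMMAS AND PROOFS =====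


set_option maxHeartbeats 1000000 in
theorem row_zzzz (t : List Int) (v : Bool) (s : Int)  :
    aJ (0::0::0::0::t) 0 v s =
      ((bRow (0::0::0::0::t)).1, v || (bRow (0::0::0::0::t)).2.1, s + (bRow (0::0::0::0::t)).2.2) := by
  simp_all [aJ, aNext, bRow, mergeTiles]

set_option maxHeartbeats 1000000 in
theorem row_zzzn (d : Int) (t : List Int) (v : Bool) (s : Int) (hd : d ≠ 0) :
    aJ (0::0::0::d::t) 0 v s =
      ((bRow (0::0::0::d::t)).1, v || (bRow (0::0::0::d::t)).2.1, s + (bRow (0::0::0::d::t)).2.2) := by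
  simp_all [aJ, aNext, bRow, mergeTiles]

set_option maxHeartbeats 1000000 in
theorem row_zznz (c : Int) (t : List Int) (v : Bool) (s : Int) (hc : c ≠ 0) :
    aJ (0::0::c::0::t) 0 v s =
      ((bRow (0::0::c::0::t)).1, v || (bRow (0::0::c::0::t)).2.1, s + (bRow (0::0::c::0::t)).2.2) := by
  simp_all [aJ, aNext, bRow, mergeTiles]

set_option maxHeartbeats 1000000 in
theorem row_zznn (c d : Int) (t : List Int) (v : Bool) (s : Int) (hc : c ≠ 0) (hd : d ≠ 0) :
    aJ (0::0::c::d::t) 0 v s =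
      ((bRow (0::0::c::d::t)).1, v || (bRow (0::0::c::d::t)).2.1, s + (bRow (0::0::c::d::t)).2.2) := by
  rcases eq_or_ne c d with hcd|hcd <;>
    simp_all [aJ, aNext, bRow, mergeTiles]

set_option maxHeartbeats 1000000 in
theorem row_znzz (b : Int) (t : List Int) (v : Bool) (s : Int) (hb : b ≠ 0) :
    aJ (0::b::0::0::t) 0 v s =
      ((bRow (0::b::0::0::t)).1, v || (bRow (0::b::0::0::t)).2.1, s + (bRow (0::b::0::0::t)).2.2) := by
  simp_all [aJ, aNext, bRow, mergeTiles]

set_option maxHeartbeats 1000000 in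
theorem row_znzn (b d : Int) (t : List Int) (v : Bool) (s : Int) (hb : b ≠ 0) (hd : d ≠ 0) :
    aJ (0::b::0::d::t) 0 v s =
      ((bRow (0::b::0::d::t)).1, v || (bRow (0::b::0::d::t)).2.1, s + (bRow (0::b::0::d::t)).2.2) := by
  rcases eq_or_ne b d with hbd|hbd <;>
    simp_all [aJ, aNext, bRow, mergeTiles]

set_option maxHeartbeats 1000000 in
theorem row_znnz (b c : Int) (t : List Int) (v : Bool) (s : Int) (hb : b ≠ 0) (hc : c ≠ 0) :
    aJ (0::b::c::0::t) 0 v s =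
      ((bRow (0::b::c::0::t)).1, v || (bRow (0::b::c::0::t)).2.1, s + (bRow (0::b::c::0::t)).2.2) := by
  rcases eq_or_ne b c with hbc|hbc <;>
    simp_all [aJ, aNext, bRow, mergeTiles]

set_option maxHeartbeats 1000000 in
theorem row_znnn (b c d : Int) (t : List Int) (v : Bool) (s : Int) (hb : b ≠ 0) (hc : c ≠ 0) (hd : d ≠ 0) :
    aJ (0::b::c::d::t) 0 v s =
      ((bRow (0::b::c::d::t)).1, v || (bRow (0::b::c::d::t)).2.1, s + (bRow (0::b::c::d::t)).2.2) := by
  rcases eq_or_ne b c with hbc|hbc <;>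
  rcases eq_or_ne b d with hbd|hbd <;>
  rcases eq_or_ne c d with hcd|hcd <;>
    simp_all [aJ, aNext, bRow, mergeTiles]

set_option maxHeartbeats 1000000 in
theorem row_nzzz (a : Int) (t : List Int) (v : Bool) (s : Int) (ha : a ≠ 0) :
    aJ (a::0::0::0::t) 0 v s =
      ((bRow (a::0::0::0::t)).1, v || (bRow (a::0::0::0::t)).2.1, s + (bRow (a::0::0::0::t)).2.2) := by
  simp_all [aJ, aNext, bRow, mergeTiles]

set_option maxHeartbeats 1000000 in
theorem row_nzzn (a d : Int) (t : List Int) (v : Bool) (s : Int) (ha : a ≠ 0) (hd : d ≠ 0) :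
    aJ (a::0::0::d::t) 0 v s =
      ((bRow (a::0::0::d::t)).1, v || (bRow (a::0::0::d::t)).2.1, s + (bRow (a::0::0::d::t)).2.2) := by
  rcases eq_or_ne a d with had|had <;>
    simp_all [aJ, aNext, bRow, mergeTiles]

set_option maxHeartbeats 1000000 in
theorem row_nznz (a c : Int) (t : List Int) (v : Bool) (s : Int) (ha : a ≠ 0) (hc : c ≠ 0) :
    aJ (a::0::c::0::t) 0 v s =
      ((bRow (a::0::c::0::t)).1, v || (bRow (a::0::c::0::t)).2.1, s + (bRow (a::0::c::0::t)).2.2) := by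
  rcases eq_or_ne a c with hac|hac <;>
    simp_all [aJ, aNext, bRow, mergeTiles]

set_option maxHeartbeats 1000000 in
theorem row_nznn (a c d : Int) (t : List Int) (v : Bool) (s : Int) (ha : a ≠ 0) (hc : c ≠ 0) (hd : d ≠ 0) :
    aJ (a::0::c::d::t) 0 v s =
      ((bRow (a::0::c::d::t)).1, v || (bRow (a::0::c::d::t)).2.1, s + (bRow (a::0::c::d::t)).2.2) := by
  rcases eq_or_ne a c with hac|hac <;>
  rcases eq_or_ne a d with had|had <;>
  rcases eq_or_ne c d with hcd|hcd <;>
    simp_all [aJ, aNext, bRow, mergeTiles]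

set_option maxHeartbeats 1000000 in
theorem row_nnzz (a b : Int) (t : List Int) (v : Bool) (s : Int) (ha : a ≠ 0) (hb : b ≠ 0) :
    aJ (a::b::0::0::t) 0 v s =
      ((bRow (a::b::0::0::t)).1, v || (bRow (a::b::0::0::t)).2.1, s + (bRow (a::b::0::0::t)).2.2) := by
  rcases eq_or_ne a b with hab|hab <;>
    simp_all [aJ, aNext, bRow, mergeTiles]

set_option maxHeartbeats 1000000 in
theorem row_nnzn (a b d : Int) (t : List Int) (v : Bool) (s : Int) (ha : a ≠ 0) (hb : b ≠ 0) (hd : d ≠ 0) :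
    aJ (a::b::0::d::t) 0 v s =
      ((bRow (a::b::0::d::t)).1, v || (bRow (a::b::0::d::t)).2.1, s + (bRow (a::b::0::d::t)).2.2) := by
  rcases eq_or_ne a b with hab|hab <;>
  rcases eq_or_ne a d with had|had <;>
  rcases eq_or_ne b d with hbd|hbd <;>
    simp_all [aJ, aNext, bRow, mergeTiles]

set_option maxHeartbeats 1000000 in
theorem row_nnnz (a b c : Int) (t : List Int) (v : Bool) (s : Int) (ha : a ≠ 0) (hb : b ≠ 0) (hc : c ≠ 0) :
    aJ (a::b::c::0::t) 0 v s =
      ((bRow (a::b::c::0::t)).1, v || (bRow (a::b::c::0::t)).2.1, s + (bRow (a::b::c::0::t)).2.2) := by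
  rcases eq_or_ne a b with hab|hab <;>
  rcases eq_or_ne a c with hac|hac <;>
  rcases eq_or_ne b c with hbc|hbc <;>
    simp_all [aJ, aNext, bRow, mergeTiles]

set_option maxHeartbeats 1000000 in
theorem row_nnnn (a b c d : Int) (t : List Int) (v : Bool) (s : Int) (ha : a ≠ 0) (hb : b ≠ 0) (hc : c ≠ 0) (hd : d ≠ 0) :
    aJ (a::b::c::d::t) 0 v s =
      ((bRow (a::b::c::d::t)).1, v || (bRow (a::b::c::d::t)).2.1, s + (bRow (a::b::c::d::t)).2.2) := by
  rcases eq_or_ne a b with hab|hab <;>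
  rcases eq_or_ne a c with hac|hac <;>
  rcases eq_or_ne a d with had|had <;>
  rcases eq_or_ne b c with hbc|hbc <;>
  rcases eq_or_ne b d with hbd|hbd <;>
  rcases eq_or_ne c d with hcd|hcd <;>
    simp_all [aJ, aNext, bRow, mergeTiles] <;> omega

theorem row_eq (a b c d : Int) (t : List Int) (v : Bool) (s : Int) :
    aJ (a::b::c::d::t) 0 v s =
      ((bRow (a::b::c::d::t)).1, v || (bRow (a::b::c::d::t)).2.1,
        s + (bRow (a::b::c::d::t)).2.2) := by
  by_cases ha : a = 0 <;> by_cases hb : b = 0 <;> by_cases hc : c = 0 <;> by_cases hd : d = 0 <;>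
    first

    | (subst ha; subst hb; subst hc; subst hd; exact row_zzzz t v s)
    | (subst ha; subst hb; subst hc; exact row_zzzn d t v s hd)
    | (subst ha; subst hb; subst hd; exact row_zznz c t v s hc)
    | (subst ha; subst hb; exact row_zznn c d t v s hc hd)
    | (subst ha; subst hc; subst hd; exact row_znzz b t v s hb)
    | (subst ha; subst hc; exact row_znzn b d t v s hb hd)
    | (subst ha; subst hd; exact row_znnz b c t v s hb hc)
    | (subst ha; exact row_znnn b c d t v s hb hc hd)
    | (subst hb; subst hc; subst hd; exact row_nzzz a t v s ha)
    | (subst hb; subst hc; exact row_nzzn a d t v s ha hd)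
    | (subst hb; subst hd; exact row_nznz a c t v s ha hc)
    | (subst hb; exact row_nznn a c d t v s ha hc hd)
    | (subst hc; subst hd; exact row_nnzz a b t v s ha hb)
    | (subst hc; exact row_nnzn a b d t v s ha hb hd)
    | (subst hd; exact row_nnnz a b c t v s ha hb hc)
    | ( exact row_nnnn a b c d t v s ha hb hc hd)

theorem adjRow_eq (b : List (List Int)) (i : Nat) (s : Int) :
    adjRow b i 0 s = s + pairs (pvGet b i 0) (pvGet b i 1) (pvGet b i 2) (pvGet b i 3) := by
  simp [adjRow, pairs]
  split_ifs <;> omega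

theorem adjCol_eq (b : List (List Int)) (j : Nat) (s : Int) :
    adjCol b j 0 s = s + pairs (pvGet b 0 j) (pvGet b 1 j) (pvGet b 2 j) (pvGet b 3 j) := by
  simp [adjCol, pairs]
  split_ifs <;> omega

theorem adj_eq (b : List (List Int)) : adjacent_check b = adjacent_check_alt b := by
  simp [adjacent_check, adjacent_check_alt, adjRow_eq, adjCol_eq]
  ring

-- ===== VERDICT (by name: the statement is the Claim_ definition above) =====
set_option maxHeartbeats 1000000 in
theorem try_move_left_spec : Claim_equal_try_move_left := by
  intro m _ hpre
  obtain ⟨h4, hr⟩ := hpre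
  rcases m with _ | ⟨r0, m⟩; · simp at h4
  rcases m with _ | ⟨r1, m⟩; · simp at h4
  rcases m with _ | ⟨r2, m⟩; · simp at h4
  rcases m with _ | ⟨r3, m⟩; · simp at h4
  have h0 := hr r0 (by simp)
  have h1 := hr r1 (by simp)
  have h2 := hr r2 (by simp)
  have h3 := hr r3 (by simp)
  rcases r0 with _|⟨a0,_|⟨b0,_|⟨c0,_|⟨d0,t0⟩⟩⟩⟩ <;> simp at h0
  rcases r1 with _|⟨a1,_|⟨b1,_|⟨c1,_|⟨d1,t1⟩⟩⟩⟩ <;> simp at h1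
  rcases r2 with _|⟨a2,_|⟨b2,_|⟨c2,_|⟨d2,t2⟩⟩⟩⟩ <;> simp at h2
  rcases r3 with _|⟨a3,_|⟨b3,_|⟨c3,_|⟨d3,t3⟩⟩⟩⟩ <;> simp at h3
  show _ = _
  simp [try_move_left, try_move_left_alt, aI, row_eq, adj_eq]
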